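-- pv_equiv track=rewrite | github.com/sergiocamaramadrid-cyber/Motor-de-Velos-SCM | scripts/audit_scm.py | group_kfold_split
-- ===== SOURCE A (Python) =====
-- from typing import Iterator
--
-- def group_kfold_split(
--     groups: list[str], n_splits: int
-- ) -> Iterator[tuple[int, list[int], list[int]]]:
--     """Yield ``(fold_id, train_idx, test_idx)`` for GroupKFold.
--
--     Each unique group appears in exactly one test fold.  Groups are assigned
--     to folds round-robin so that the fold sizes are as equal as possible.
--
--     Parameters
--     ----------
--     groups : list of str
--         Group label for every sample (length = total radial points).
--     n_splits : int
--         Number of folds.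
--
--     Yields
--     ------
--     fold_id : int
--         Zero-based fold index.
--     train_idx : list of int
--         Indices of training samples.
--     test_idx : list of int
--         Indices of test samples.
--     """
--     unique_groups = list(dict.fromkeys(groups))  # preserve insertion order
--     fold_of: dict[str, int] = {g: i % n_splits for i, g in enumerate(unique_groups)}
--
--     for fold in range(n_splits):
--         test_set = {g for g, f in fold_of.items() if f == fold}
--         train_idx = [i for i, g in enumerate(groups) if g not in test_set]
--         test_idx = [i for i, g in enumerate(groups) if g in test_set]
--         yield fold, train_idx, test_idx
-- ===== SOURCE B (Python) =====
-- def group_kfold_split(groups, n_splits):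
--     """Yield (fold_id, train_idx, test_idx) for GroupKFold (round-robin groups).
--
--     Single labeling pass assigns each sample its group's fold, buckets collect
--     test indices per fold, and training indices are re-assembled by sorting the
--     other buckets -- no per-fold rescans of ``groups``.
--     """
--     fold_of = {}
--     labels = []
--     for g in groups:
--         f = fold_of.get(g)
--         if f is None:
--             f = len(fold_of) % n_splits
--             fold_of[g] = f
--         labels.append(f)
--     buckets = {}
--     for i, f in enumerate(labels):
--         buckets.setdefault(f, []).append(i)
--     for fold in range(n_splits):
--         test_idx = buckets.get(fold, [])
--         train_idx = sorted(x for f, b in buckets.items() if f != fold for x in b)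
--         yield fold, train_idx, test_idx
-- ===== Notes on version B (the rewrite author's own statement) =====
-- stated objective: alternative
-- what changed: A rescans groups once per fold (building a per-fold test set from the fold_of dict and filtering enumerate(groups) twice); B makes one labeling pass that assigns each sample its group's fold, scatters indices into per-fold buckets, and reassembles each training list by sorting the concatenation of the other buckets.
import Mathlib
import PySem

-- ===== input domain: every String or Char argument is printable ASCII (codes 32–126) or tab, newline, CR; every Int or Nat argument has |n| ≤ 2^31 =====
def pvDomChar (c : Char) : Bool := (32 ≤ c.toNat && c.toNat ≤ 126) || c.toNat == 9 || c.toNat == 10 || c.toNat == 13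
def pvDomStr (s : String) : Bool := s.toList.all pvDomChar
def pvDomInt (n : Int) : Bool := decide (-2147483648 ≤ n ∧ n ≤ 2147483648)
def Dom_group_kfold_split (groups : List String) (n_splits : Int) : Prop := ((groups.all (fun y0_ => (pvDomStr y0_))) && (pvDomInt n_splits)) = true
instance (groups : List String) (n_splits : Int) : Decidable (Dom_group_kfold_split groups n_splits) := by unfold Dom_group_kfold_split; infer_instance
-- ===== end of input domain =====

-- B replaces A's per-fold rescans of `groups` by one labeling pass plus fold buckets,
-- reassembling each training list by sorting the other buckets (objective: alternative algorithm, same cost).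
-- Both Pythons are generators; equivalence is about the yielded sequence, materialised as a list.

-- ===== PORT A =====
def group_kfold_split (groups : List String) (n_splits : Int) : List (Int × List Int × List Int) :=
  let unique_groups := PySem.List.dedup groups
  let fold_of : PySem.Dict String Int :=
    (PySem.List.enumerate unique_groups).foldl
      (fun d p => d.insert p.2 (PySem.Int.mod p.1 n_splits)) PySem.Dict.empty
  (PySem.List.pyRange 0 n_splits 1).foldl (fun acc fold =>
    let test_set : PySem.Set String :=
      PySem.Set.ofList ((fold_of.items.filter (fun p => p.2 == fold)).map (fun p => p.1))
    let train_idx := ((PySem.List.enumerate groups).filter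
      (fun p => !(PySem.Set.contains test_set p.2))).map (fun p => p.1)
    let test_idx := ((PySem.List.enumerate groups).filter
      (fun p => PySem.Set.contains test_set p.2)).map (fun p => p.1)
    acc ++ [(fold, train_idx, test_idx)]) []

-- ===== PORT B =====
def group_kfold_split_alt (groups : List String) (n_splits : Int) : List (Int × List Int × List Int) :=
  -- labeling pass: fold_of grows as new groups appear; labels[i] = fold of groups[i]
  let st := groups.foldl
    (fun (st : PySem.Dict String Int × List Int) g =>
      match st.1.get? g with
      | some f => (st.1, st.2 ++ [f])
      | none =>
        let f := PySem.Int.mod (st.1.size : Int) n_splits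
        (st.1.insert g f, st.2 ++ [f]))
    (PySem.Dict.empty, [])
  let labels := st.2
  -- buckets.setdefault(f, []).append(i)  ==  buckets[f] = buckets.get(f, []) + [i]
  let buckets : PySem.Dict Int (List Int) :=
    (PySem.List.enumerate labels).foldl
      (fun d p => d.modify p.2 [] (fun l => l ++ [p.1])) PySem.Dict.empty
  (PySem.List.pyRange 0 n_splits 1).foldl (fun acc fold =>
    let test_idx := buckets.getD fold []
    let train_idx := PySem.List.sorted
      ((buckets.items.filter (fun p => !(p.1 == fold))).flatMap (fun p => p.2)) (fun x => x)
    acc ++ [(fold, train_idx, test_idx)]) []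

-- ===== PRECONDITION & SPEC =====
-- Pre_ excludes exactly the inputs where Python A raises ZeroDivisionError
-- (n_splits = 0 with at least one sample); B raises there too.
def Pre_group_kfold_split (groups : List String) (n_splits : Int) : Prop :=
  groups = [] ∨ n_splits ≠ 0
instance (groups : List String) (n_splits : Int) : Decidable (Pre_group_kfold_split groups n_splits) := by unfold Pre_group_kfold_split; infer_instance
def pvWitness_group_kfold_split : List String × Int := (["a", "b", "a", "c"], 2)

def Spec_group_kfold_split (groups : List String) (n_splits : Int) (out : List (Int × List Int × List Int)) : Prop := out = group_kfold_split_alt groups n_splits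
instance (groups : List String) (n_splits : Int) (out : List (Int × List Int × List Int)) : Decidable (Spec_group_kfold_split groups n_splits out) := by unfold Spec_group_kfold_split; infer_instance

-- ===== CLAIM (what is proved, stated in full; the proofs are below) =====
def Claim_equal_group_kfold_split : Prop := ∀ (groups : List String) (n_splits : Int), Dom_group_kfold_split groups n_splits → Pre_group_kfold_split groups n_splits → Spec_group_kfold_split groups n_splits (group_kfold_split groups n_splits)

-- ===== LEMMAS AND PROOFS =====

-- fold label that A assigns to group g: (first-occurrence rank of g) % n_splits
def pvFv (groups : List String) (n : Int) (g : String) : Int :=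
  PySem.Int.mod ((List.idxOf g (PySem.List.dedup groups) : Nat) : Int) n

-- A's fold_of dict, written as a literal association list
def pvAdict (groups : List String) (n : Int) : PySem.Dict String Int :=
  PySem.Dict.mk ((PySem.List.enumerate (PySem.List.dedup groups)).map
    (fun p => (p.2, PySem.Int.mod p.1 n)))

theorem pvAdict_keys (groups : List String) (n : Int) :
    (pvAdict groups n).keys = PySem.List.dedup groups := by
  simp [pvAdict, PySem.Dict.keys, List.map_map, Function.comp_def, PySem.List.map_snd_enumerate]

theorem pvAdict_nodup_keys (groups : List String) (n : Int) :
    (pvAdict groups n).keys.Nodup := by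
  rw [pvAdict_keys]; exact PySem.List.nodup_dedup groups

theorem pvAdict_get?_mem (groups : List String) (n : Int) {g : String}
    (h : g ∈ PySem.List.dedup groups) :
    (pvAdict groups n).get? g = some (pvFv groups n g) := by
  apply PySem.Dict.get?_of_mem_items _ _ (pvAdict_nodup_keys groups n)
  have hi : List.idxOf g (PySem.List.dedup groups) < (PySem.List.dedup groups).length :=
    List.idxOf_lt_length_iff.mpr h
  refine List.mem_map.mpr ⟨((List.idxOf g (PySem.List.dedup groups) : Nat), g), ?_, rfl⟩
  exact (PySem.List.mem_enumerate_iff _ _ _).mpr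
    ⟨List.idxOf g (PySem.List.dedup groups), hi, by simp⟩

theorem pvAdict_get?_not_mem (groups : List String) (n : Int) {g : String}
    (h : g ∉ groups) : (pvAdict groups n).get? g = none := by
  rw [PySem.Dict.get?_eq_none_iff_not_mem_keys, pvAdict_keys]
  simpa [PySem.List.mem_dedup] using h

theorem pvA_foldof (groups : List String) (n : Int) :
    (PySem.List.enumerate (PySem.List.dedup groups)).foldl
      (fun d p => d.insert p.2 (PySem.Int.mod p.1 n)) PySem.Dict.empty = pvAdict groups n := by
  apply PySem.Dict.ext
  rw [PySem.Dict.items_foldl_insert_fresh (PySem.List.enumerate (PySem.List.dedup groups))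
      (fun p => p.2) (fun p => PySem.Int.mod p.1 n) PySem.Dict.empty
      (fun a _ => rfl)
      (by rw [PySem.List.map_snd_enumerate]; exact PySem.List.nodup_dedup groups)]
  rfl

theorem pvAdict_size (groups : List String) (n : Int) :
    (pvAdict groups n).size = (PySem.List.dedup groups).length := by
  simp [pvAdict, PySem.Dict.size, PySem.List.length_enumerate]

theorem pvDedup_append (xs : List String) (x : String) :
    PySem.List.dedup (xs ++ [x]) =
      if x ∈ xs then PySem.List.dedup xs else PySem.List.dedup xs ++ [x] := by
  have h1 : PySem.List.dedup (xs ++ [x]) = PySem.Set.add (PySem.List.dedup xs) x := by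
    simp [PySem.List.dedup_eq_ofList, PySem.Set.ofList_eq_foldl, List.foldl_append]
  rw [h1]
  by_cases h : x ∈ xs <;>
    simp [PySem.Set.add, PySem.Set.contains, h]

theorem pvFv_append_mem (xs : List String) (x : String) (n : Int) {g : String}
    (hg : g ∈ xs) : pvFv (xs ++ [x]) n g = pvFv xs n g := by
  unfold pvFv
  rw [pvDedup_append]
  by_cases h : x ∈ xs
  · rw [if_pos h]
  · rw [if_neg h, List.idxOf_append, if_pos ((PySem.List.mem_dedup xs g).mpr hg)]

theorem pvFv_append_new (xs : List String) (x : String) (n : Int) (h : x ∉ xs) :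
    pvFv (xs ++ [x]) n x = PySem.Int.mod ((PySem.List.dedup xs).length : Int) n := by
  unfold pvFv
  rw [pvDedup_append, if_neg h, List.idxOf_append,
    if_neg (fun hc => h ((PySem.List.mem_dedup xs x).mp hc))]
  simp

theorem pvAdict_append_mem (xs : List String) (x : String) (n : Int) (h : x ∈ xs) :
    pvAdict (xs ++ [x]) n = pvAdict xs n := by
  unfold pvAdict; rw [pvDedup_append, if_pos h]

theorem pvAdict_append_new (xs : List String) (x : String) (n : Int) (h : x ∉ xs) :
    pvAdict (xs ++ [x]) n =
      (pvAdict xs n).insert x (PySem.Int.mod ((PySem.List.dedup xs).length : Int) n) := by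
  apply PySem.Dict.ext
  rw [PySem.Dict.items_insert_of_not_contains _ _ ?hc]
  case hc =>
    rw [Bool.eq_false_iff]
    intro hc
    exact h ((PySem.List.mem_dedup xs x).mp
      ((pvAdict_keys xs n) ▸ (PySem.Dict.contains_iff_mem_keys _ _).mp hc))
  unfold pvAdict
  rw [pvDedup_append, if_neg h, PySem.List.enumerate_append]
  simp [PySem.List.enumerate_cons, PySem.List.enumerate_nil]

-- B's labeling loop computes (A's fold_of, the per-sample fold labels)
theorem pvB_labels (groups : List String) (n : Int) :
    groups.foldl
      (fun (st : PySem.Dict String Int × List Int) g =>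
        match st.1.get? g with
        | some f => (st.1, st.2 ++ [f])
        | none =>
          let f := PySem.Int.mod ((st.1.size : Nat) : Int) n
          (st.1.insert g f, st.2 ++ [f]))
      (PySem.Dict.empty, []) = (pvAdict groups n, groups.map (pvFv groups n)) := by
  induction groups using List.reverseRecOn with
  | nil =>
    refine Prod.ext ?_ rfl
    apply PySem.Dict.ext; rfl
  | append_singleton xs x ih =>
    rw [List.foldl_append, ih, List.foldl_cons, List.foldl_nil]
    by_cases h : x ∈ xs
    · have hg := pvAdict_get?_mem xs n ((PySem.List.mem_dedup xs x).mpr h)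
      simp only [hg]
      rw [pvAdict_append_mem xs x n h]
      refine Prod.ext rfl ?_
      show xs.map (pvFv xs n) ++ [pvFv xs n x] = (xs ++ [x]).map (pvFv (xs ++ [x]) n)
      rw [List.map_append]
      congr 1
      · exact (List.map_congr_left (fun g hg' => (pvFv_append_mem xs x n hg').symm))
      · simp [pvFv_append_mem xs x n h]
    · have hg := pvAdict_get?_not_mem xs n h
      simp only [hg]
      rw [pvAdict_append_new xs x n h]
      refine Prod.ext ?_ ?_
      · show (pvAdict xs n).insert x (PySem.Int.mod ((pvAdict xs n).size : Int) n) = _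
        rw [pvAdict_size]
      · show xs.map (pvFv xs n) ++ [PySem.Int.mod ((pvAdict xs n).size : Int) n]
            = (xs ++ [x]).map (pvFv (xs ++ [x]) n)
        rw [List.map_append, pvAdict_size]
        congr 1
        · exact (List.map_congr_left (fun g hg' => (pvFv_append_mem xs x n hg').symm))
        · simp [pvFv_append_new xs x n h]

-- enumerate of a mapped list
theorem pvEnum_map {α β : Type} (h : α → β) (xs : List α) (s : Int) :
    PySem.List.enumerate (xs.map h) s
      = (PySem.List.enumerate xs s).map (fun p => (p.1, h p.2)) := by
  induction xs generalizing s with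
  | nil => simp [PySem.List.enumerate_nil]
  | cons y ys ih => simp [PySem.List.enumerate_cons, ih]

-- the bucket fold, looked up at a fold id
theorem pvBuckets_getD (labels : List Int) (c : Int) :
    ((PySem.List.enumerate labels).foldl
        (fun (d : PySem.Dict Int (List Int)) p => d.modify p.2 [] (fun l => l ++ [p.1]))
        PySem.Dict.empty).getD c []
      = ((PySem.List.enumerate labels).filter (fun p => p.2 == c)).map (fun p => p.1) := by
  rw [← List.foldl_map (f := fun p : Int × Int => (p.2, p.1))
      (g := fun (d : PySem.Dict Int (List Int)) p => d.modify p.1 [] (fun l => l ++ [p.2])),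
    PySem.Dict.getD_foldl_modify_append, PySem.Dict.getD_empty]
  simp [List.filter_map, List.map_map, Function.comp_def]

theorem pvBuckets_keys (labels : List Int) :
    ((PySem.List.enumerate labels).foldl
        (fun (d : PySem.Dict Int (List Int)) p => d.modify p.2 [] (fun l => l ++ [p.1]))
        PySem.Dict.empty).keys = PySem.Set.ofList labels := by
  rw [PySem.Dict.keys_foldl_modify_key (PySem.List.enumerate labels) (fun p => p.2) []
      (fun _ p => fun l => l ++ [p.1]) PySem.Dict.empty, PySem.Dict.keys_empty,
    PySem.List.map_snd_enumerate]
  rfl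

theorem pvBuckets_nodup_keys (labels : List Int) :
    ((PySem.List.enumerate labels).foldl
        (fun (d : PySem.Dict Int (List Int)) p => d.modify p.2 [] (fun l => l ++ [p.1]))
        PySem.Dict.empty).keys.Nodup := by
  rw [pvBuckets_keys]; exact PySem.Set.nodup_ofList labels

-- grouping by distinct keys is a permutation of the original list
theorem pvPerm_partition {α : Type} (f : α → Int) (ks : List Int) (l : List α)
    (hnd : ks.Nodup) (hcov : ∀ x ∈ l, f x ∈ ks) :
    (ks.flatMap (fun k => l.filter (fun x => f x == k))).Perm l := by
  induction ks generalizing l with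
  | nil =>
    have : l = [] := List.eq_nil_iff_forall_not_mem.mpr (fun a ha => by simpa using hcov a ha)
    simp [this]
  | cons k ks ih =>
    rw [List.flatMap_cons]
    have hkk : k ∉ ks := (List.nodup_cons.mp hnd).1
    have hrw : ∀ k' ∈ ks, l.filter (fun x => f x == k')
        = (l.filter (fun x => !(f x == k))).filter (fun x => f x == k') := by
      intro k' hk'
      rw [List.filter_filter]
      apply List.filter_congr
      intro x _
      by_cases hx : f x = k'
      · have : k' ≠ k := fun he => hkk (he ▸ hk')
        simp [hx, this]
      · simp [hx]
    have hflat : ks.flatMap (fun k' => l.filter (fun x => f x == k'))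
        = ks.flatMap (fun k' => (l.filter (fun x => !(f x == k))).filter (fun x => f x == k')) := by
      rw [List.flatMap, List.flatMap]
      congr 1
      exact List.map_congr_left hrw
    rw [hflat]
    have ihp := ih (l.filter (fun x => !(f x == k))) (List.nodup_cons.mp hnd).2
      (by
        intro x hx
        have hm := List.mem_filter.mp hx
        have := hcov x hm.1
        rcases List.mem_cons.mp this with he | hin
        · exfalso; simp [he] at hm
        · exact hin)
    exact List.Perm.trans (List.Perm.append_left _ ihp) (List.filter_append_perm _ l)

-- A's per-fold test set membership, for groups that occur in the data
theorem pvTestset_contains (groups : List String) (n fold : Int) {g : String} (hg : g ∈ groups) :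
    PySem.Set.contains
      (PySem.Set.ofList (((pvAdict groups n).items.filter (fun p => p.2 == fold)).map
        (fun p => p.1))) g
      = (pvFv groups n g == fold) := by
  have hmem : g ∈ (((pvAdict groups n).items.filter (fun p => p.2 == fold)).map (fun p => p.1))
      ↔ pvFv groups n g = fold := by
    constructor
    · intro hm
      rcases List.mem_map.mp hm with ⟨p, hp, hp1⟩
      rcases List.mem_filter.mp hp with ⟨hpi, hpf⟩
      have hget : (pvAdict groups n).get? p.1 = some p.2 :=
        PySem.Dict.get?_of_mem_items _ (by simpa using hpi) (pvAdict_nodup_keys groups n)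
      rw [hp1, pvAdict_get?_mem groups n ((PySem.List.mem_dedup groups g).mpr hg)] at hget
      have h2 : pvFv groups n g = p.2 := by injection hget
      rw [h2]
      exact eq_of_beq hpf
    · intro hf
      refine List.mem_map.mpr ⟨(g, pvFv groups n g), ?_, rfl⟩
      refine List.mem_filter.mpr ⟨?_, by simp [hf]⟩
      exact PySem.Dict.mem_items_of_get?_eq_some _
        (pvAdict_get?_mem groups n ((PySem.List.mem_dedup groups g).mpr hg))
  by_cases hf : pvFv groups n g = fold <;>
    simp [PySem.Set.contains, PySem.Set.mem_ofList, hmem, hf]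

theorem pvTest_eq (groups : List String) (n fold : Int) :
    ((PySem.List.enumerate (groups.map (pvFv groups n))).foldl
        (fun (d : PySem.Dict Int (List Int)) p => d.modify p.2 [] (fun l => l ++ [p.1]))
        PySem.Dict.empty).getD fold []
      = ((PySem.List.enumerate groups).filter
          (fun p => pvFv groups n p.2 == fold)).map (fun p => p.1) := by
  rw [pvBuckets_getD, pvEnum_map]
  simp [List.filter_map, List.map_map, Function.comp_def]

theorem pvTrain_eq (groups : List String) (n fold : Int) :
    PySem.List.sorted
      ((((PySem.List.enumerate (groups.map (pvFv groups n))).foldl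
            (fun (d : PySem.Dict Int (List Int)) p => d.modify p.2 [] (fun l => l ++ [p.1]))
            PySem.Dict.empty).items.filter (fun p => !(p.1 == fold))).flatMap
        (fun p => p.2)) (fun x => x)
      = ((PySem.List.enumerate groups).filter
          (fun p => !(pvFv groups n p.2 == fold))).map (fun p => p.1) := by
  have hnd := pvBuckets_nodup_keys (groups.map (pvFv groups n))
  have hkeys := pvBuckets_keys (groups.map (pvFv groups n))
  rw [PySem.Dict.items_eq_map_keys _ hnd [], List.filter_map, List.flatMap_map]
  have hcomp : ((fun p : Int × List Int => !(p.1 == fold)) ∘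
      (fun k => (k, ((PySem.List.enumerate (groups.map (pvFv groups n))).foldl
        (fun (d : PySem.Dict Int (List Int)) p => d.modify p.2 [] (fun l => l ++ [p.1]))
        PySem.Dict.empty).getD k []))) = fun k => !(k == fold) := rfl
  rw [hcomp]
  have hbody : ∀ k, (fun a => ((fun k => (k,
      ((PySem.List.enumerate (groups.map (pvFv groups n))).foldl
        (fun (d : PySem.Dict Int (List Int)) p => d.modify p.2 [] (fun l => l ++ [p.1]))
        PySem.Dict.empty).getD k [])) a).2) k
      = ((PySem.List.enumerate groups).filter
          (fun p => pvFv groups n p.2 == k)).map (fun p => p.1) := by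
    intro k; exact pvTest_eq groups n k
  have hflat : (((PySem.List.enumerate (groups.map (pvFv groups n))).foldl
        (fun (d : PySem.Dict Int (List Int)) p => d.modify p.2 [] (fun l => l ++ [p.1]))
        PySem.Dict.empty).keys.filter (fun k => !(k == fold))).flatMap
        (fun a => (a, ((PySem.List.enumerate (groups.map (pvFv groups n))).foldl
          (fun (d : PySem.Dict Int (List Int)) p => d.modify p.2 [] (fun l => l ++ [p.1]))
          PySem.Dict.empty).getD a []).2)
      = (((PySem.List.enumerate (groups.map (pvFv groups n))).foldl
        (fun (d : PySem.Dict Int (List Int)) p => d.modify p.2 [] (fun l => l ++ [p.1]))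
        PySem.Dict.empty).keys.filter (fun k => !(k == fold))).flatMap
        (fun k => ((PySem.List.enumerate groups).filter
          (fun p => pvFv groups n p.2 == k)).map (fun p => p.1)) := by
    rw [List.flatMap, List.flatMap]
    exact congrArg List.flatten (List.map_congr_left (fun k _ => hbody k))
  rw [hflat]
  -- name the key list and the (≠ fold) part of the enumeration
  set kne := (((PySem.List.enumerate (groups.map (pvFv groups n))).foldl
      (fun (d : PySem.Dict Int (List Int)) p => d.modify p.2 [] (fun l => l ++ [p.1]))
      PySem.Dict.empty).keys.filter (fun k => !(k == fold))) with hkne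
  set lne := (PySem.List.enumerate groups).filter
      (fun p => !(pvFv groups n p.2 == fold)) with hlne
  have hpush : kne.flatMap (fun k => ((PySem.List.enumerate groups).filter
        (fun p => pvFv groups n p.2 == k)).map (fun p => p.1))
      = (kne.flatMap (fun k => (PySem.List.enumerate groups).filter
          (fun p => pvFv groups n p.2 == k))).map (fun p => p.1) := by
    rw [List.map_flatMap]
  rw [hpush]
  have hinner : ∀ k ∈ kne, (PySem.List.enumerate groups).filter
        (fun p => pvFv groups n p.2 == k)
      = lne.filter (fun p => pvFv groups n p.2 == k) := by
    intro k hk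
    have hkf : k ≠ fold := by
      have := (List.mem_filter.mp hk).2
      simpa using this
    rw [hlne, List.filter_filter]
    apply List.filter_congr
    intro p _
    by_cases hp : pvFv groups n p.2 = k
    · simp [hp, hkf]
    · simp [hp]
  have hflat2 : kne.flatMap (fun k => (PySem.List.enumerate groups).filter
        (fun p => pvFv groups n p.2 == k))
      = kne.flatMap (fun k => lne.filter (fun p => pvFv groups n p.2 == k)) := by
    rw [List.flatMap, List.flatMap]
    exact congrArg List.flatten (List.map_congr_left hinner)
  rw [hflat2]
  have hperm : (kne.flatMap (fun k => lne.filter (fun p => pvFv groups n p.2 == k))).Perm lne := by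
    apply pvPerm_partition (fun p => pvFv groups n p.2) kne lne
    · rw [hkne, hkeys]
      exact (PySem.Set.nodup_ofList _).filter _
    · intro p hp
      rcases List.mem_filter.mp hp with ⟨hpe, hpf⟩
      refine List.mem_filter.mpr ⟨?_, hpf⟩
      rw [hkeys, PySem.Set.mem_ofList]
      rcases (PySem.List.mem_enumerate_iff _ _ _).mp hpe with ⟨j, hj, rfl⟩
      exact List.mem_map_of_mem (List.getElem_mem hj)
  apply PySem.List.sorted_eq_of_perm_of_pairwise_lt
  · exact (hperm.map (fun p => p.1)).symm
  · rw [List.pairwise_map]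
    exact (PySem.List.pairwise_lt_enumerate groups 0).filter _

-- ===== VERDICT (by name: the statement is the Claim_ definition above) =====
theorem group_kfold_split_spec : Claim_equal_group_kfold_split := by
  intro groups n _ _
  unfold Spec_group_kfold_split
  simp only [group_kfold_split, group_kfold_split_alt]
  have hst2 : _ = groups.map (pvFv groups n) := congrArg Prod.snd (pvB_labels groups n)
  rw [pvA_foldof groups n, hst2]
  rw [PySem.List.foldl_append_singleton_eq_map, PySem.List.foldl_append_singleton_eq_map]
  refine congrArg ([] ++ ·) ?_
  apply List.map_congr_left
  intro fold _
  have henum : ∀ p ∈ PySem.List.enumerate groups 0, p.2 ∈ groups := by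
    intro p hp
    rcases (PySem.List.mem_enumerate_iff _ _ _).mp hp with ⟨j, hj, rfl⟩
    exact List.getElem_mem hj
  have htrain : List.filter (fun p => !(PySem.Set.contains
        (PySem.Set.ofList (((pvAdict groups n).items.filter (fun p => p.2 == fold)).map
          (fun p => p.1))) p.2)) (PySem.List.enumerate groups)
      = List.filter (fun p => !(pvFv groups n p.2 == fold)) (PySem.List.enumerate groups) :=
    List.filter_congr (fun p hp => by rw [pvTestset_contains groups n fold (henum p hp)])
  have htest : List.filter (fun p => PySem.Set.contains
        (PySem.Set.ofList (((pvAdict groups n).items.filter (fun p => p.2 == fold)).map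
          (fun p => p.1))) p.2) (PySem.List.enumerate groups)
      = List.filter (fun p => pvFv groups n p.2 == fold) (PySem.List.enumerate groups) :=
    List.filter_congr (fun p hp => pvTestset_contains groups n fold (henum p hp))
  rw [htrain, htest, pvTrain_eq groups n fold, pvTest_eq groups n fold]
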